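-- pv_equiv track=rewrite | github.com/AnthonyBane/CodeWars | String incrementer/solution.py | increment_string
-- ===== SOURCE A (Python) =====
-- def increment_string(strng):
--     backwards_strng = strng[::-1]
--     backwards_num_array = []
--     num_array = []
--     for char in backwards_strng:
--         if char.isnumeric():
--             backwards_num_array.append(char)
--         else:
--             break
--
--     for i in range(len(backwards_num_array)):
--         num_array.append(backwards_num_array.pop())
--
--     if not num_array:
--         return strng + "1"
--     num = int("".join(num_array))
--     num += 1
--     if len(str(num)) > len(num_array):
--         new_str = strng[: -(len(num_array))] + str(num)
--
--     elif len(str(num)) == len(num_array):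
--         new_str = strng[: -(len(str(num)))] + str(num)
--
--     else:
--         new_str = strng[: -(len(str(num)))] + str(num)
--
--     return new_str
-- ===== SOURCE B (Python) =====
-- def increment_string(strng):
--     if strng and strng[-1].isnumeric():
--         last = strng[-1]
--         if last != '9':
--             return strng[:-1] + chr(ord(last) + 1)
--         return increment_string(strng[:-1]) + '0'
--     return strng + '1'
-- ===== Notes on version B (the rewrite author's own statement) =====
-- stated objective: simpler
-- what changed: B replaces A's string reversal, two collection loops, int() conversion, str() and three-arm padding branch by a short recursive character-level ripple carry: a trailing digit below nine is bumped in place, a trailing nine becomes zero with the carry recursing on the rest of the string, and a string with no trailing digit gets a one appended - no number conversion at all.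
import Mathlib
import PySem

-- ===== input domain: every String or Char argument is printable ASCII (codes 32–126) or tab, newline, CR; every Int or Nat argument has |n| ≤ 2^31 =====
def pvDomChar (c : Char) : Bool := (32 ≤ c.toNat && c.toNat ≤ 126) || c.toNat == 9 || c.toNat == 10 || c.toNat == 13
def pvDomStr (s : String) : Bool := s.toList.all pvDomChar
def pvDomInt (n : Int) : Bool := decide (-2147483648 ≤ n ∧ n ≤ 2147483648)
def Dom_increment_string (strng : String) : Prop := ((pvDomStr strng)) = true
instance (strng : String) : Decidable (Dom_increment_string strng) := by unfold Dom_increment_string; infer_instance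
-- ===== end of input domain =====

-- B replaces A's reverse/collect/pop loops, int() conversion, str() and three-arm padding
-- branch by a recursive character-level ripple carry (no number conversion at all);
-- objective: simpler, same O(n) cost.

-- ===== PORT A =====
-- 'for char in backwards_strng: if char.isnumeric(): append else: break'
-- (char.isnumeric() on the printable-ASCII domain is exactly the digit test '0'..'9')
def pvACollect : List Char → List Char → List Char
  | [], acc => acc
  | c :: rest, acc => if PySem.Chars.isdigit c then pvACollect rest (acc ++ [c]) else acc

-- 'for i in range(len(backwards_num_array)): num_array.append(backwards_num_array.pop())'
-- (fuel = the length evaluated once, as in Python; pop() is getLastD/dropLast, never on [] here)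
def pvAPop : Nat → List Char → List Char → List Char
  | 0, _, num => num
  | n + 1, b, num => pvAPop n b.dropLast (num ++ [b.getLastD '0'])

-- int("".join(num_array)): hand-ported as the decimal fold over the collected characters —
-- exact here because the collect loop only admits '0'..'9' (so int() neither strips, signs,
-- sees '_' nor raises), and the value is nonnegative, so Nat carries Python's int
def pvVal (l : List Char) : Nat := l.foldl (fun a c => 10 * a + (c.toNat - 48)) 0

-- str(num): hand-ported as the base-10 digit characters, most significant first —
-- exact for num ≥ 1, which always holds here (num = int(...) + 1 ≥ 1)
def pvStrNat (n : Nat) : List Char :=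
  if n = 0 then ['0'] else ((Nat.digits 10 n).map fun d => Char.ofNat (48 + d)).reverse

def increment_string (strng : String) : String :=
  let s := strng.toList
  -- strng[::-1]: step -1 never raises, so the slice? is always some
  let backwards := ((PySem.Str.slice? strng none none (-1)).getD "").toList
  let backwardsNumArray := pvACollect backwards []
  let numArray := pvAPop backwardsNumArray.length backwardsNumArray []
  if numArray = [] then String.ofList (s ++ ['1'])
  else
    let num : Nat := pvVal numArray + 1
    let numStr := pvStrNat num
    if numStr.length > numArray.length then
      String.ofList (PySem.List.slice s none (some (-(numArray.length : Int))) ++ numStr)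
    else if numStr.length = numArray.length then
      String.ofList (PySem.List.slice s none (some (-(numStr.length : Int))) ++ numStr)
    else
      String.ofList (PySem.List.slice s none (some (-(numStr.length : Int))) ++ numStr)

-- ===== PORT B =====
-- 'if strng and strng[-1].isnumeric(): …' — recursion on strng[:-1] exactly as in Source B
-- (isnumeric() on the printable-ASCII domain is exactly the digit test '0'..'9')
def pvBInc (s : List Char) : List Char :=
  if h : s ≠ [] ∧ PySem.Chars.isdigit (s.getLastD ' ') then   -- 'strng and strng[-1].isnumeric()'
    if s.getLastD ' ' ≠ '9' then
      s.dropLast ++ [Char.ofNat ((s.getLastD ' ').toNat + 1)]  -- strng[:-1] + chr(ord(last) + 1)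
    else pvBInc s.dropLast ++ ['0']        -- increment_string(strng[:-1]) + '0'
  else s ++ ['1']                          -- empty or no trailing digit: strng + "1"
termination_by s.length
decreasing_by
  have := List.length_pos_of_ne_nil h.1
  simp only [List.length_dropLast]; omega

def increment_string_alt (strng : String) : String := String.ofList (pvBInc strng.toList)

-- ===== PRECONDITION & SPEC =====
def Spec_increment_string (strng : String) (out : String) : Prop := out = increment_string_alt strng
instance (strng : String) (out : String) : Decidable (Spec_increment_string strng out) := by unfold Spec_increment_string; infer_instance

-- ===== CLAIM (what is proved, stated in full; the proofs are below) =====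
def Claim_equal_increment_string : Prop := ∀ (strng : String), Dom_increment_string strng → Spec_increment_string strng (increment_string strng)

-- ===== LEMMAS AND PROOFS =====

-- A's result in closed form: with d the trailing digit run,
-- [] → s ++ "1", otherwise cut min(|str(val d + 1)|, |d|) characters and append str(val d + 1)
def pvAForm (s : List Char) : List Char :=
  let d := (s.reverse.takeWhile PySem.Chars.isdigit).reverse
  if d = [] then s ++ ['1']
  else
    let t := pvStrNat (pvVal d + 1)
    s.take (s.length - min t.length d.length) ++ t

-- A's first loop is takeWhile of the digit test
theorem pvACollect_eq (bs acc : List Char) :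
    pvACollect bs acc = acc ++ bs.takeWhile PySem.Chars.isdigit := by
  induction bs generalizing acc with
  | nil => simp [pvACollect]
  | cons c rest ih =>
    by_cases h : PySem.Chars.isdigit c
    · rw [pvACollect, if_pos h, ih, List.takeWhile_cons_of_pos h]; simp
    · rw [pvACollect, if_neg h, List.takeWhile_cons_of_neg h]; simp

-- A's pop loop reverses the collected list
theorem pvAPop_eq (b num : List Char) : pvAPop b.length b num = num ++ b.reverse := by
  induction b using List.reverseRecOn generalizing num with
  | nil => simp [pvAPop]
  | append_singleton ys y ih =>
    rw [List.length_append, List.length_singleton, pvAPop, List.dropLast_concat,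
      List.getLastD_concat, ih]
    simp

-- pvStrNat is never empty
theorem pvStrNat_ne_nil (n : Nat) : pvStrNat n ≠ [] := by
  unfold pvStrNat
  split
  · simp
  · simp [Nat.digits_ne_nil_iff_ne_zero, *]

-- A port evaluates to the closed form
theorem A_closed (strng : String) :
    increment_string strng = String.ofList (pvAForm strng.toList) := by
  unfold increment_string pvAForm
  rw [PySem.Str.slice?_none_none_neg_one]
  simp only [Option.getD_some, String.toList_ofList, pvACollect_eq, List.nil_append, pvAPop_eq]
  set s := strng.toList with hs
  set d := (s.reverse.takeWhile PySem.Chars.isdigit).reverse with hd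
  by_cases hnil : d = []
  · rw [if_pos hnil, if_pos hnil]
  · rw [if_neg hnil, if_neg hnil]
    set t := pvStrNat (pvVal d + 1) with ht
    have ht1 : 1 ≤ t.length := List.length_pos_of_ne_nil (pvStrNat_ne_nil _)
    have hd1 : 1 ≤ d.length := List.length_pos_of_ne_nil hnil
    by_cases hgt : t.length > d.length
    · rw [if_pos hgt, PySem.List.slice_to_neg_natCast s d.length hd1]
      have : min t.length d.length = d.length := by omega
      rw [this]
    · rw [if_neg hgt]
      have hm : min t.length d.length = t.length := by omega
      rw [hm]
      by_cases heq : t.length = d.length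
      · rw [if_pos heq, PySem.List.slice_to_neg_natCast s t.length ht1]
      · rw [if_neg heq, PySem.List.slice_to_neg_natCast s t.length ht1]

-- digit-character facts
theorem isdigit_bounds {c : Char} (h : PySem.Chars.isdigit c = true) :
    48 ≤ c.toNat ∧ c.toNat ≤ 57 := by
  simp only [PySem.Chars.isdigit, Bool.and_eq_true, decide_eq_true_eq] at h
  exact ⟨h.1, h.2⟩

theorem pvVal_append (l : List Char) (c : Char) :
    pvVal (l ++ [c]) = 10 * pvVal l + (c.toNat - 48) := by
  simp [pvVal, List.foldl_append]

-- decimal step of pvStrNat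
theorem pvStrNat_step (v e : Nat) (hv : 0 < v) (he : e < 10) :
    pvStrNat (10 * v + e) = pvStrNat v ++ [Char.ofNat (48 + e)] := by
  unfold pvStrNat
  rw [if_neg (by omega), if_neg (by omega),
    Nat.digits_def' (b := 10) (by norm_num) (show 0 < 10 * v + e by omega)]
  have h1 : (10 * v + e) % 10 = e := by omega
  have h2 : (10 * v + e) / 10 = v := by omega
  rw [h1, h2, List.map_cons, List.reverse_cons]

theorem pvStrNat_single (e : Nat) (h0 : 0 < e) (h9 : e < 10) :
    pvStrNat e = [Char.ofNat (48 + e)] := by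
  interval_cases e <;> decide

-- str(val m) is the trailing |str(val m)| characters of a digit run m with positive value
theorem pvVal_suffix (m : List Char) (hd : ∀ c ∈ m, PySem.Chars.isdigit c = true)
    (hv : 0 < pvVal m) :
    (pvStrNat (pvVal m)).length ≤ m.length ∧
      m.take (m.length - (pvStrNat (pvVal m)).length) ++ pvStrNat (pvVal m) = m := by
  induction m using List.reverseRecOn with
  | nil => simp [pvVal] at hv
  | append_singleton l c ih =>
    have hc := isdigit_bounds (hd c (by simp))
    have hchr : Char.ofNat (48 + (c.toNat - 48)) = c := by
      have h48 : 48 + (c.toNat - 48) = c.toNat := by omega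
      rw [h48, Char.ofNat_toNat]
    rw [pvVal_append] at hv ⊢
    by_cases hv' : pvVal l = 0
    · have hdc : 0 < c.toNat - 48 := by omega
      rw [hv', mul_zero, zero_add] at hv ⊢
      rw [pvStrNat_single _ hdc (by omega), hchr]
      refine ⟨by simp, ?_⟩
      simp
    · have hvl : 0 < pvVal l := Nat.pos_of_ne_zero hv'
      obtain ⟨ihl, ihe⟩ := ih (fun x hx => hd x (by simp [hx])) hvl
      rw [pvStrNat_step _ _ hvl (by omega), hchr]
      set t' := pvStrNat (pvVal l) with ht'
      refine ⟨by simp; omega, ?_⟩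
      have hlen : (l ++ [c]).length - (t' ++ [c]).length = l.length - t'.length := by
        simp
      rw [hlen, List.take_append_of_le_length (by omega), ← List.append_assoc, ihe]

-- a takeWhile is the take of its own length
theorem takeWhile_eq_take_length (l : List Char) (p : Char → Bool) :
    l.takeWhile p = l.take (l.takeWhile p).length := by
  induction l with
  | nil => rfl
  | cons c t ih =>
    by_cases h : p c
    · rw [List.takeWhile_cons_of_pos h]; simp only [List.length_cons, List.take_succ_cons]
      rw [← ih]
    · rw [List.takeWhile_cons_of_neg h]; rfl

-- the trailing digit run, recovered as a drop of s
theorem drop_eq_takeWhile_reverse (s : List Char) :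
    s.drop (s.length - (s.reverse.takeWhile PySem.Chars.isdigit).length)
      = (s.reverse.takeWhile PySem.Chars.isdigit).reverse := by
  have h1 : s.reverse.takeWhile PySem.Chars.isdigit
      = s.reverse.take (s.reverse.takeWhile PySem.Chars.isdigit).length :=
    takeWhile_eq_take_length _ _
  conv_rhs => rw [h1]
  rw [List.reverse_take]
  simp

-- unfolding pvBInc at its three kinds of input
theorem pvBInc_nil : pvBInc [] = ['1'] := by rw [pvBInc]; simp

theorem pvBInc_snoc_nondigit (l : List Char) (c : Char)
    (hc : PySem.Chars.isdigit c = false) : pvBInc (l ++ [c]) = (l ++ [c]) ++ ['1'] := by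
  rw [pvBInc]; simp [hc]

theorem pvBInc_snoc_digit (l : List Char) (c : Char)
    (hc : PySem.Chars.isdigit c = true) (h9 : c ≠ '9') :
    pvBInc (l ++ [c]) = l ++ [Char.ofNat (c.toNat + 1)] := by
  rw [pvBInc]; simp [hc, h9]

theorem pvBInc_snoc_nine (l : List Char) : pvBInc (l ++ ['9']) = pvBInc l ++ ['0'] := by
  rw [pvBInc]
  simp [show PySem.Chars.isdigit '9' = true by decide]

-- the closed form satisfies B's recursion: main equality
theorem AForm_eq_BInc (s : List Char) : pvAForm s = pvBInc s := by
  induction s using List.reverseRecOn with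
  | nil => rw [pvBInc_nil]; simp [pvAForm]
  | append_singleton l c ih =>
    by_cases hc : PySem.Chars.isdigit c = true
    · -- trailing character is a digit
      have hrev : (l ++ [c]).reverse.takeWhile PySem.Chars.isdigit
          = c :: l.reverse.takeWhile PySem.Chars.isdigit := by
        rw [List.reverse_append, List.reverse_singleton, List.singleton_append,
          List.takeWhile_cons_of_pos hc]
      have hcb := isdigit_bounds hc
      set d'' := (l.reverse.takeWhile PySem.Chars.isdigit).reverse with hd''def
      have hdfull : ((l ++ [c]).reverse.takeWhile PySem.Chars.isdigit).reverse
          = d'' ++ [c] := by rw [hrev, List.reverse_cons]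
      have hd'' : ∀ x ∈ d'', PySem.Chars.isdigit x = true := fun x hx =>
        List.mem_takeWhile_imp (List.mem_reverse.mp hx)
      have hn''l : d''.length ≤ l.length := by
        rw [hd''def, List.length_reverse]
        simpa using List.IsPrefix.length_le
          (List.takeWhile_prefix (l := l.reverse) PySem.Chars.isdigit)
      have hldec : l.take (l.length - d''.length) ++ d'' = l := by
        have h := drop_eq_takeWhile_reverse l
        rw [← hd''def] at h
        have hlen : (l.reverse.takeWhile PySem.Chars.isdigit).length = d''.length := by
          rw [hd''def, List.length_reverse]
        rw [hlen] at h
        conv_rhs => rw [← List.take_append_drop (l.length - d''.length) l]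
        rw [h]
      by_cases h9 : c = '9'
      · -- ripple case: '9' becomes '0' and the carry moves left
        subst h9
        rw [pvBInc_snoc_nine, ← ih]
        simp only [pvAForm]
        rw [hdfull]
        rw [if_neg (by simp)]
        have hval : pvVal (d'' ++ ['9']) + 1 = 10 * (pvVal d'' + 1) + 0 := by
          rw [pvVal_append, show ('9'.toNat - 48) = 9 by decide]
          omega
        rw [hval, pvStrNat_step _ _ (by omega) (by omega)]
        have h0 : Char.ofNat (48 + 0) = '0' := by decide
        rw [h0]
        by_cases hnil'' : d'' = []
        · -- no further digits: "…9" → "…10"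
          rw [if_pos hnil'', hnil'']
          have hv0 : pvVal ([] : List Char) = 0 := rfl
          rw [hv0, pvStrNat_single 1 (by omega) (by omega)]
          have h1 : Char.ofNat (48 + 1) = '1' := by decide
          rw [h1]
          simp
        · rw [if_neg hnil'']
          set t' := pvStrNat (pvVal d'' + 1) with ht'
          have ht1 : 1 ≤ t'.length := List.length_pos_of_ne_nil (pvStrNat_ne_nil _)
          have hn1 : 1 ≤ d''.length := List.length_pos_of_ne_nil hnil''
          have hmin : min (t' ++ ['0']).length (d'' ++ ['9']).length
              = min t'.length d''.length + 1 := by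
            have h1 : (t' ++ ['0']).length = t'.length + 1 := by simp
            have h2 : (d'' ++ ['9']).length = d''.length + 1 := by simp
            rw [h1, h2]; omega
          rw [hmin]
          have hidx : (l ++ ['9']).length - (min t'.length d''.length + 1)
              = l.length - min t'.length d''.length := by simp
          rw [hidx, List.take_append_of_le_length (by omega)]
          have hlenrev : (List.takeWhile PySem.Chars.isdigit l.reverse).length = d''.length := by
            rw [hd''def, List.length_reverse]
          simp [hlenrev]
      · -- no carry: last digit just goes up by one
        rw [pvBInc_snoc_digit l c hc h9]
        simp only [pvAForm]
        rw [hdfull, if_neg (by simp)]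
        have hc57 : c.toNat ≠ 57 := by
          intro h
          exact h9 (by rw [← Char.ofNat_toNat c, h])
        have hval : pvVal (d'' ++ [c]) + 1 = 10 * pvVal d'' + (c.toNat - 48 + 1) := by
          rw [pvVal_append]; omega
        have hchr : Char.ofNat (48 + (c.toNat - 48 + 1)) = Char.ofNat (c.toNat + 1) := by
          have : 48 + (c.toNat - 48 + 1) = c.toNat + 1 := by omega
          rw [this]
        by_cases hv'' : pvVal d'' = 0
        · rw [hval, hv'', mul_zero, zero_add,
            pvStrNat_single _ (by omega) (by omega), hchr]
          have hmin : min [Char.ofNat (c.toNat + 1)].length (d'' ++ [c]).length = 1 := by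
            simp
          rw [hmin]
          have hidx : (l ++ [c]).length - 1 = l.length := by simp
          rw [hidx, List.take_left]
        · have hpos : 0 < pvVal d'' := Nat.pos_of_ne_zero hv''
          obtain ⟨hkn, hsuf⟩ := pvVal_suffix d'' hd'' hpos
          set t'' := pvStrNat (pvVal d'') with ht''
          rw [hval, pvStrNat_step _ _ hpos (by omega), hchr, ← ht'']
          have hmin : min (t'' ++ [Char.ofNat (c.toNat + 1)]).length (d'' ++ [c]).length
              = t''.length + 1 := by
            have h1 : (t'' ++ [Char.ofNat (c.toNat + 1)]).length = t''.length + 1 := by simp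
            have h2 : (d'' ++ [c]).length = d''.length + 1 := by simp
            rw [h1, h2]; omega
          rw [hmin]
          have hidx : (l ++ [c]).length - (t''.length + 1) = l.length - t''.length := by
            simp
          rw [hidx, List.take_append_of_le_length (by omega)]
          have hkey : l.take (l.length - t''.length) ++ t'' = l := by
            set P := l.take (l.length - d''.length) with hPdef
            have hP : P.length = l.length - d''.length := by
              rw [hPdef, List.length_take]; omega
            have h2 : (P ++ d'').take (P.length + (d''.length - t''.length))
                = P ++ d''.take (d''.length - t''.length) := by
              rw [List.take_append, List.take_of_length_le (by omega)]
              simp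
            rw [hldec] at h2
            have hcount : l.length - t''.length = P.length + (d''.length - t''.length) := by
              rw [hP]; omega
            rw [hcount, h2, List.append_assoc, hsuf, hldec]
          rw [← List.append_assoc, hkey]
    · -- trailing character is not a digit: both append "1"
      rw [pvBInc_snoc_nondigit l c (by simpa using hc)]
      simp only [pvAForm]
      rw [List.reverse_append, List.reverse_singleton, List.singleton_append,
        List.takeWhile_cons_of_neg (by simpa using hc)]
      simp

-- ===== VERDICT (by name: the statement is the Claim_ definition above) =====
theorem increment_string_spec : Claim_equal_increment_string := by
  intro strng _
  unfold Spec_increment_string increment_string_alt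
  rw [A_closed, AForm_eq_BInc]
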